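-- pv_equiv track=rewrite | github.com/SkaneTrails/meal-planner | api/services/store_order.py | is_order_consistent
-- ===== SOURCE A (Python) =====
-- from itertools import pairwise
--
-- def is_order_consistent(db_order: list[str], tick_sequence: list[str]) -> bool:
--     """Check if ticked items are already in the correct relative order.
--
--     Compares the DB positions of ticked items (ignoring unknowns) against
--     the tick sequence. If the subsequence is monotonically increasing,
--     no reorder is needed.
--
--     Args:
--         db_order: Current item ordering from Firestore.
--         tick_sequence: Items in the order they were ticked off.
--
--     Returns:
--         True if no reorder is needed, False if items were ticked out of order.
--     """
--     if len(tick_sequence) <= 1: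
--         return True
--
--     position = {name: i for i, name in enumerate(db_order)}
--
--     seen: set[str] = set()
--     known_positions: list[int] = []
--     for item in tick_sequence:
--         if item not in seen and item in position:
--             seen.add(item)
--             known_positions.append(position[item])
--
--     if len(known_positions) <= 1:
--         return True
--
--     return all(a < b for a, b in pairwise(known_positions))
-- ===== SOURCE B (Python) =====
-- def is_order_consistent(db_order: list[str], tick_sequence: list[str]) -> bool:
--     """Sort-and-compare: the ticked known items are already in DB order iff
--     sorting them by DB position changes nothing (positions of distinct names
--     are distinct, so non-strict sortedness equals strict increase)."""
--     position = {name: i for i, name in enumerate(db_order)}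
--     ticked = list(dict.fromkeys(t for t in tick_sequence if t in position))
--     return ticked == sorted(ticked, key=position.__getitem__)
-- ===== Notes on version B (the rewrite author's own statement) =====
-- stated objective: alternative
-- what changed: Replaces A's build-then-pairwise-scan of the known-position list with a sort-and-compare check: B dedups the ticked items known to the DB and returns whether sorting them by DB position is a no-op (positions of distinct names are distinct, so non-strict sortedness equals A's strict pairwise increase).
import Mathlib
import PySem

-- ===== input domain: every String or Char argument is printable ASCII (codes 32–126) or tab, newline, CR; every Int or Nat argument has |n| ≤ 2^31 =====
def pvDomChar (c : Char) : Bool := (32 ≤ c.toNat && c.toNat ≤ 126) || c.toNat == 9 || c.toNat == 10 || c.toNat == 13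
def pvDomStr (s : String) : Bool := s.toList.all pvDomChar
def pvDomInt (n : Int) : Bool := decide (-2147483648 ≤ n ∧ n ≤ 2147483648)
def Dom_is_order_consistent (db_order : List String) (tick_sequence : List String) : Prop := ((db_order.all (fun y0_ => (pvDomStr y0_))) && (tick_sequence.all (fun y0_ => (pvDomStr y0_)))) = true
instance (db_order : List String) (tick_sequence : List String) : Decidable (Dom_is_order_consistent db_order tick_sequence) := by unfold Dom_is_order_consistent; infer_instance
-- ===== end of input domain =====

-- B replaces A's dedup-collect-then-pairwise scan by a sort-and-compare check
-- (deduped known ticks are in DB order iff sorting them by DB position is a no-op); objective: alternative algorithm.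

-- ===== PORT A =====
-- Port of A's `all(a < b for a, b in pairwise(ks))`.
def pyPairwiseAll : List Int → Bool
  | [] => true
  | [_] => true
  | a :: b :: rest => (decide (a < b)) && pyPairwiseAll (b :: rest)

def is_order_consistent (db_order : List String) (tick_sequence : List String) : Bool :=
  if tick_sequence.length ≤ 1 then true
  else
    let position : PySem.Dict String Int :=
      (PySem.List.enumerate db_order).foldl (fun d p => d.insert p.2 p.1) PySem.Dict.empty
    let st := tick_sequence.foldl
      (fun (st : PySem.Set String × List Int) item =>
        if !(PySem.Set.contains st.1 item) && position.contains item then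
          (PySem.Set.add st.1 item, st.2 ++ [position.getD item 0])
        else st)
      (PySem.Set.empty, [])
    if st.2.length ≤ 1 then true
    else pyPairwiseAll st.2

-- ===== PORT B =====
def is_order_consistent_alt (db_order : List String) (tick_sequence : List String) : Bool :=
  let position : PySem.Dict String Int :=
    (PySem.List.enumerate db_order).foldl (fun d p => d.insert p.2 p.1) PySem.Dict.empty
  let ticked := PySem.List.dedup (tick_sequence.filter (fun t => position.contains t))
  decide (ticked = PySem.List.sorted ticked (fun t => position.getD t 0) false)

-- ===== PRECONDITION & SPEC =====
def Spec_is_order_consistent (db_order : List String) (tick_sequence : List String) (out : Bool) : Prop := out = is_order_consistent_alt db_order tick_sequence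
instance (db_order : List String) (tick_sequence : List String) (out : Bool) : Decidable (Spec_is_order_consistent db_order tick_sequence out) := by unfold Spec_is_order_consistent; infer_instance

-- ===== CLAIM (what is proved, stated in full; the proofs are below) =====
def Claim_equal_is_order_consistent : Prop := ∀ (db_order : List String) (tick_sequence : List String), Dom_is_order_consistent db_order tick_sequence → Spec_is_order_consistent db_order tick_sequence (is_order_consistent db_order tick_sequence)

-- ===== LEMMAS AND PROOFS =====

-- The deduplicated known-tick names A's loop walks over.
def tickedOf (position : PySem.Dict String Int) (seen : PySem.Set String) : List String → List String
  | [] => []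
  | item :: rest =>
      if !(PySem.Set.contains seen item) && position.contains item then
        item :: tickedOf position (PySem.Set.add seen item) rest
      else tickedOf position seen rest

theorem foldA_eq (position : PySem.Dict String Int) :
    ∀ (tick : List String) (seen : PySem.Set String) (acc : List Int),
      (tick.foldl
        (fun (st : PySem.Set String × List Int) item =>
          if !(PySem.Set.contains st.1 item) && position.contains item then
            (PySem.Set.add st.1 item, st.2 ++ [position.getD item 0])
          else st)
        (seen, acc)).2 = acc ++ (tickedOf position seen tick).map (fun t => position.getD t 0) := by
  intro tick
  induction tick with
  | nil => intro seen acc; simp [tickedOf]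
  | cons item rest ih =>
      intro seen acc
      simp only [List.foldl, tickedOf]
      by_cases hc : (!(PySem.Set.contains seen item) && position.contains item) = true
      · rw [if_pos hc, if_pos hc, ih]
        simp
      · rw [if_neg hc, if_neg hc, ih]

theorem tickedOf_eq (position : PySem.Dict String Int) :
    ∀ (tick : List String) (seen : PySem.Set String),
      (seen : List String) ++ tickedOf position seen tick =
        (tick.filter (fun t => position.contains t)).foldl PySem.Set.add seen := by
  intro tick
  induction tick with
  | nil => intro seen; simp [tickedOf]
  | cons item rest ih =>
      intro seen
      simp only [tickedOf]
      rw [List.filter_cons]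
      by_cases hp : position.contains item = true
      · rw [if_pos hp]
        by_cases hs : PySem.Set.contains seen item = true
        · rw [if_neg (by rw [hs]; simp)]
          rw [List.foldl_cons]
          have hmem : item ∈ seen := by simpa [PySem.Set.contains] using hs
          have hadd : PySem.Set.add seen item = seen := by simp [PySem.Set.add, hmem]
          rw [hadd, ih]
        · rw [Bool.not_eq_true] at hs
          rw [if_pos (by rw [hs, hp]; rfl)]
          rw [List.foldl_cons]
          have hmem : item ∉ seen := by simpa [PySem.Set.contains] using hs
          have hadd : PySem.Set.add seen item = seen ++ [item] := by simp [PySem.Set.add, hmem]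
          rw [← ih (PySem.Set.add seen item), hadd]
          simp
      · rw [Bool.not_eq_true] at hp
        rw [if_neg (by rw [hp]; simp), if_neg (by rw [hp]; simp)]
        exact ih seen

theorem tickedOf_empty (position : PySem.Dict String Int) (tick : List String) :
    tickedOf position PySem.Set.empty tick =
      PySem.List.dedup (tick.filter (fun t => position.contains t)) := by
  have h := tickedOf_eq position tick PySem.Set.empty
  simpa [PySem.Set.empty, PySem.List.dedup_eq_ofList, PySem.Set.ofList_eq_foldl] using h

theorem mem_tickedOf_contains (position : PySem.Dict String Int) :
    ∀ (tick : List String) (seen : PySem.Set String) (x : String),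
      x ∈ tickedOf position seen tick → position.contains x = true := by
  intro tick
  induction tick with
  | nil => intro seen x h; simp [tickedOf] at h
  | cons item rest ih =>
      intro seen x h
      simp only [tickedOf] at h
      by_cases hc : (!(PySem.Set.contains seen item) && position.contains item) = true
      · rw [if_pos hc] at h
        have hc2 := hc
        simp only [Bool.and_eq_true] at hc2
        rcases List.mem_cons.1 h with rfl | h
        · exact hc2.2
        · exact ih _ _ h
      · rw [if_neg hc] at h; exact ih _ _ h

-- The enumerate-built position dict maps distinct contained keys to distinct values.
theorem dict_inv :
    ∀ (db : List String) (s : Int) (d0 : PySem.Dict String Int),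
      (∀ k, d0.contains k = true → d0.getD k 0 < s) →
      (∀ a b, d0.contains a = true → d0.contains b = true → a ≠ b → d0.getD a 0 ≠ d0.getD b 0) →
      (∀ k, ((PySem.List.enumerate db s).foldl (fun d p => d.insert p.2 p.1) d0).contains k = true →
        ((PySem.List.enumerate db s).foldl (fun d p => d.insert p.2 p.1) d0).getD k 0 < s + db.length) ∧
      (∀ a b, ((PySem.List.enumerate db s).foldl (fun d p => d.insert p.2 p.1) d0).contains a = true →
        ((PySem.List.enumerate db s).foldl (fun d p => d.insert p.2 p.1) d0).contains b = true → a ≠ b →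
        ((PySem.List.enumerate db s).foldl (fun d p => d.insert p.2 p.1) d0).getD a 0 ≠
        ((PySem.List.enumerate db s).foldl (fun d p => d.insert p.2 p.1) d0).getD b 0) := by
  intro db
  induction db with
  | nil =>
      intro s d0 hb hi
      constructor
      · intro k hk; simpa using hb k (by simpa [PySem.List.enumerate_nil] using hk)
      · intro a b ha hb' hne
        simp only [PySem.List.enumerate_nil, List.foldl_nil] at *
        exact hi a b ha hb' hne
  | cons name rest ih =>
      intro s d0 hb hi
      rw [PySem.List.enumerate_cons]
      simp only [List.foldl_cons]
      have hb' : ∀ k, (d0.insert name s).contains k = true → (d0.insert name s).getD k 0 < s + 1 := by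
        intro k hk
        rw [PySem.Dict.getD_insert]
        rw [PySem.Dict.contains_insert] at hk
        simp only [Bool.or_eq_true, beq_iff_eq] at hk
        split_ifs with h
        · omega
        · have hck : d0.contains k = true := by tauto
          have := hb k hck
          omega
      have hi' : ∀ a b, (d0.insert name s).contains a = true → (d0.insert name s).contains b = true →
          a ≠ b → (d0.insert name s).getD a 0 ≠ (d0.insert name s).getD b 0 := by
        intro a b ha hbc hne
        rw [PySem.Dict.getD_insert, PySem.Dict.getD_insert]
        rw [PySem.Dict.contains_insert] at ha hbc
        simp only [Bool.or_eq_true, beq_iff_eq] at ha hbc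
        by_cases h1 : a = name <;> by_cases h2 : b = name
        · exact absurd (h1.trans h2.symm) hne
        · have hcb : d0.contains b = true := by tauto
          have := hb b hcb
          simp only [h1, if_true, h2, if_false]
          omega
        · have hca : d0.contains a = true := by tauto
          have := hb a hca
          simp only [h1, if_false, h2, if_true]
          omega
        · have hca : d0.contains a = true := by tauto
          have hcb : d0.contains b = true := by tauto
          simp only [h1, h2, if_false]
          exact hi a b hca hcb hne
      have hrec := ih (s + 1) (d0.insert name s) hb' hi'
      refine ⟨fun k hk => ?_, hrec.2⟩
      have := hrec.1 k hk
      simp only [List.length_cons]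
      push_cast
      omega

-- A's pairwise-all is exactly strict pairwise increase.
theorem pyPairwiseAll_iff : ∀ (l : List Int), pyPairwiseAll l = true ↔ l.Pairwise (· < ·)
  | [] => by simp [pyPairwiseAll]
  | [_] => by simp [pyPairwiseAll]
  | a :: b :: r => by
      simp only [pyPairwiseAll, Bool.and_eq_true, decide_eq_true_eq]
      rw [pyPairwiseAll_iff (b :: r)]
      constructor
      · rintro ⟨hab, hpw⟩
        refine List.Pairwise.cons ?_ hpw
        intro y hy
        rcases List.mem_cons.1 hy with rfl | hy
        · exact hab
        · exact lt_trans hab (List.rel_of_pairwise_cons hpw hy)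
      · intro h
        exact ⟨List.rel_of_pairwise_cons h (by simp), h.of_cons⟩

theorem pairwise_of_short {α : Type} {R : α → α → Prop} : ∀ (l : List α), l.length ≤ 1 → l.Pairwise R
  | [], _ => List.Pairwise.nil
  | [_], _ => by simp
  | _ :: _ :: _, h => by simp at h

-- The crux: pairwise-all on positions ⟺ sorting by position is a no-op (nodup names, injective positions).
theorem pairwiseAll_eq_sorted_check (position : PySem.Dict String Int) (ticked : List String)
    (hnd : ticked.Nodup)
    (hmem : ∀ x ∈ ticked, position.contains x = true)
    (hinj : ∀ a b, position.contains a = true → position.contains b = true → a ≠ b →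
      position.getD a 0 ≠ position.getD b 0) :
    pyPairwiseAll (ticked.map (fun t => position.getD t 0)) =
      decide (ticked = PySem.List.sorted ticked (fun t => position.getD t 0) false) := by
  by_cases hp : ticked.Pairwise (fun a b => position.getD a 0 < position.getD b 0)
  · have h1 : pyPairwiseAll (ticked.map (fun t => position.getD t 0)) = true := by
      rw [pyPairwiseAll_iff, List.pairwise_map]
      exact hp
    have h2 : PySem.List.sorted ticked (fun t => position.getD t 0) false = ticked :=
      PySem.List.sorted_eq_of_perm_of_pairwise_lt ticked ticked (fun t => position.getD t 0) (List.Perm.refl ticked) hp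
    rw [h1, h2]
    simp
  · have h1 : pyPairwiseAll (ticked.map (fun t => position.getD t 0)) = false := by
      rw [← Bool.not_eq_true, pyPairwiseAll_iff, List.pairwise_map]
      exact hp
    have h2 : ticked ≠ PySem.List.sorted ticked (fun t => position.getD t 0) false := by
      intro heq
      apply hp
      have hle : ticked.Pairwise (fun a b => position.getD a 0 ≤ position.getD b 0) := by
        rw [heq]
        exact PySem.List.sorted_pairwise ticked _
      have hne : ticked.Pairwise (· ≠ ·) := hnd
      have hand := hle.and hne
      refine hand.imp_of_mem ?_
      intro a b ha hb ⟨h1', h2'⟩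
      have := hinj a b (hmem a ha) (hmem b hb) h2'
      omega
    rw [h1]
    simp [h2]

-- ===== VERDICT (by name: the statement is the Claim_ definition above) =====
theorem is_order_consistent_spec : Claim_equal_is_order_consistent := by
  intro db_order tick_sequence _
  unfold Spec_is_order_consistent
  simp only [is_order_consistent, is_order_consistent_alt]
  set position : PySem.Dict String Int :=
    (PySem.List.enumerate db_order).foldl (fun d p => d.insert p.2 p.1) PySem.Dict.empty with hpos
  have hinj : ∀ a b, position.contains a = true → position.contains b = true → a ≠ b →
      position.getD a 0 ≠ position.getD b 0 := by
    have := dict_inv db_order 0 PySem.Dict.empty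
      (by intro k hk; simp [PySem.Dict.contains_empty] at hk)
      (by intro a b ha; simp [PySem.Dict.contains_empty] at ha)
    exact this.2
  set ticked := PySem.List.dedup (tick_sequence.filter (fun t => position.contains t)) with htk
  have hnd : ticked.Nodup := PySem.List.nodup_dedup _
  have hmem : ∀ x ∈ ticked, position.contains x = true := by
    intro x hx
    have := mem_tickedOf_contains position tick_sequence PySem.Set.empty x
    rw [tickedOf_empty] at this
    exact this hx
  have hmain := pairwiseAll_eq_sorted_check position ticked hnd hmem hinj
  have hks : ∀ acc seen, (tick_sequence.foldl
      (fun (st : PySem.Set String × List Int) item =>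
        if !(PySem.Set.contains st.1 item) && position.contains item then
          (PySem.Set.add st.1 item, st.2 ++ [position.getD item 0])
        else st) (seen, acc)).2 = acc ++ (tickedOf position seen tick_sequence).map (fun t => position.getD t 0) :=
    fun acc seen => foldA_eq position tick_sequence seen acc
  match htick : tick_sequence with
  | [] =>
      have ht : ticked = [] := by simp [htk]
      simp [ht, PySem.List.sorted]
  | [x] =>
      rw [if_pos (by simp)]
      by_cases hx : position.contains x = true
      · have ht : ticked = [x] := by
          simp [htk, hx, PySem.List.dedup_eq_ofList, PySem.Set.ofList_eq_foldl,
            PySem.Set.add]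
        rw [ht]
        have hs1 : PySem.List.sorted [x] (fun t => position.getD t 0) = [x] :=
          PySem.List.sorted_eq_self_of_pairwise [x] (fun t => position.getD t 0) (by simp)
        simp [hs1]
      · have ht : ticked = [] := by simp [htk, hx]
        simp [ht, PySem.List.sorted]
  | x :: y :: rest =>
      rw [if_neg (by simp)]
      rw [hks [] PySem.Set.empty, List.nil_append, tickedOf_empty, ← htk]
      split_ifs with hlen
      · rw [List.length_map] at hlen
        have hpw : ticked.Pairwise (fun a b => position.getD a 0 < position.getD b 0) :=
          pairwise_of_short ticked hlen
        have h2 : PySem.List.sorted ticked (fun t => position.getD t 0) = ticked :=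
          PySem.List.sorted_eq_of_perm_of_pairwise_lt ticked ticked (fun t => position.getD t 0) (List.Perm.refl ticked) hpw
        rw [h2]
        simp
      · exact hmain
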